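-- pv_equiv track=rewrite | github.com/yermandy/vehicle-audio-nn | model/utils.py | create_dataset_sequentially
-- ===== SOURCE A (Python) =====
-- def create_dataset_sequentially(signal, sr, events, from_time=None, till_time=None, window_length=10):
--
--     if from_time is None:
--         from_time = 0
--
--     max_time = len(signal) // sr
--
--     if till_time is None or till_time > max_time:
--         till_time = max_time
--
--     samples = []
--     labels = []
--
--     interval_time = till_time - from_time
--     n_samples = interval_time // window_length
--
--     for i in range(n_samples):
--         sample_from = from_time + i * window_length
--         sample_till = sample_from + window_length
--
--         events_timestamps = []
--
--         for event in events:
--             if sample_from <= event < sample_till: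
--                 events_timestamps.append(event)
--
--         sample = signal[int(sample_from * sr): int(sample_till * sr)]
--
--         samples.append(sample)
--         labels.append(len(events_timestamps))
--
--     return samples, labels
-- ===== SOURCE B (Python) =====
-- def create_dataset_sequentially(audio, sr, events, from_time=None, till_time=None, window_length=10):
--     if from_time is None:
--         from_time = 0
--
--     max_time = len(audio) // sr
--     if till_time is None or till_time > max_time:
--         till_time = max_time
--
--     n_samples = (till_time - from_time) // window_length
--
--     # Count events per window directly: one floor division buckets each event
--     # into its window index, so the whole events list is scanned only once.
--     labels = [0] * n_samples
--     if window_length > 0: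
--         for event in events:
--             idx = (event - from_time) // window_length
--             if 0 <= idx < n_samples:
--                 labels[idx] += 1
--
--     samples = [audio[(from_time + i * window_length) * sr:
--                      (from_time + (i + 1) * window_length) * sr]
--                for i in range(n_samples)]
--
--     return samples, labels
-- ===== Notes on version B (the rewrite author's own statement) =====
-- stated objective: alternative
-- what changed: Instead of scanning the whole events list once per window (nested loops), B computes each event's window index by one floor division and counts in a single pass over events, building the slices in a separate comprehension; slicing dominates the runtime, so the measured cost is similar. Pre_ excludes only sr = 0 and window_length = 0, where A raises ZeroDivisionError.
import Mathlib
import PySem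

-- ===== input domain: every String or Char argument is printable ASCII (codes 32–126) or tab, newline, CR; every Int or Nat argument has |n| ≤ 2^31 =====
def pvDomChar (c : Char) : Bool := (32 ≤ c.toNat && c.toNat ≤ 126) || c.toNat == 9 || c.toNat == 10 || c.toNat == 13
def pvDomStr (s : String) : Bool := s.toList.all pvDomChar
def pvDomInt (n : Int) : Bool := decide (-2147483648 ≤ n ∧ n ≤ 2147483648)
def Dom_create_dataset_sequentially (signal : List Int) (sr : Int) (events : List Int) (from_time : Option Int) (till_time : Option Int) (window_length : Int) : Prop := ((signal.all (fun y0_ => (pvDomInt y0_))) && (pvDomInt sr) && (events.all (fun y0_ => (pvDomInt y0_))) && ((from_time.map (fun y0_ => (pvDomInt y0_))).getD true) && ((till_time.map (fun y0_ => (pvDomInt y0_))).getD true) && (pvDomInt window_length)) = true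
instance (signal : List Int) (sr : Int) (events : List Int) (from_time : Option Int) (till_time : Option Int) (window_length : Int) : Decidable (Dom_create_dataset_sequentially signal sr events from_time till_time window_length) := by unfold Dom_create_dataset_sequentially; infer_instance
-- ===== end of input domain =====

-- B replaces A's per-window scan of the events list by a single bucketing pass
-- (one floor division per event); objective: alternative (different algorithm, similar measured cost).

-- ===== PORT A =====
def create_dataset_sequentially (signal : List Int) (sr : Int) (events : List Int) (from_time : Option Int) (till_time : Option Int) (window_length : Int) : List (List Int) × List Int :=
  let from_time := from_time.getD 0
  let max_time := PySem.Int.floordiv (PySem.List.len signal) sr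
  let till_time := match till_time with
    | none => max_time
    | some t => if t > max_time then max_time else t
  let interval_time := till_time - from_time
  let n_samples := PySem.Int.floordiv interval_time window_length
  (PySem.List.pyRange 0 n_samples 1).foldl
    (fun acc i =>
      let sample_from := from_time + i * window_length
      let sample_till := sample_from + window_length
      let events_timestamps := events.foldl
        (fun ts event => if sample_from ≤ event ∧ event < sample_till then ts ++ [event] else ts) []
      let sample := PySem.List.slice signal (some (sample_from * sr)) (some (sample_till * sr))
      (acc.1 ++ [sample], acc.2 ++ [(events_timestamps.length : Int)]))
    ([], [])

-- ===== PORT B =====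
def create_dataset_sequentially_alt (signal : List Int) (sr : Int) (events : List Int) (from_time : Option Int) (till_time : Option Int) (window_length : Int) : List (List Int) × List Int :=
  let from_time := from_time.getD 0
  let max_time := PySem.Int.floordiv (PySem.List.len signal) sr
  let till_time := match till_time with
    | none => max_time
    | some t => if t > max_time then max_time else t
  let n_samples := PySem.Int.floordiv (till_time - from_time) window_length
  let labels0 : List Int := List.replicate n_samples.toNat 0
  let labels : List Int :=
    if window_length > 0 then
      events.foldl
        (fun ls event =>
          let idx := PySem.Int.floordiv (event - from_time) window_length
          if 0 ≤ idx ∧ idx < n_samples then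
            PySem.List.pySetD ls idx (PySem.List.pyGetD ls idx 0 + 1)
          else ls)
        labels0
    else labels0
  let samples := (PySem.List.pyRange 0 n_samples 1).map
    (fun i => PySem.List.slice signal (some ((from_time + i * window_length) * sr))
                                      (some ((from_time + (i + 1) * window_length) * sr)))
  (samples, labels)

-- ===== PRECONDITION & SPEC =====
-- Pre_ excludes exactly sr = 0 and window_length = 0, where Python A raises ZeroDivisionError.
def Pre_create_dataset_sequentially (signal : List Int) (sr : Int) (events : List Int) (from_time : Option Int) (till_time : Option Int) (window_length : Int) : Prop := sr ≠ 0 ∧ window_length ≠ 0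
instance (signal : List Int) (sr : Int) (events : List Int) (from_time : Option Int) (till_time : Option Int) (window_length : Int) : Decidable (Pre_create_dataset_sequentially signal sr events from_time till_time window_length) := by unfold Pre_create_dataset_sequentially; infer_instance
def pvWitness_create_dataset_sequentially : List Int × Int × List Int × Option Int × Option Int × Int := ([1, 2, 3, 4, 5, 6], 1, [0, 1, 4], none, none, 2)
def Spec_create_dataset_sequentially (signal : List Int) (sr : Int) (events : List Int) (from_time : Option Int) (till_time : Option Int) (window_length : Int) (out : List (List Int) × List Int) : Prop := out = create_dataset_sequentially_alt signal sr events from_time till_time window_length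
instance (signal : List Int) (sr : Int) (events : List Int) (from_time : Option Int) (till_time : Option Int) (window_length : Int) (out : List (List Int) × List Int) : Decidable (Spec_create_dataset_sequentially signal sr events from_time till_time window_length out) := by unfold Spec_create_dataset_sequentially; infer_instance

-- ===== CLAIM (what is proved, stated in full; the proofs are below) =====
def Claim_equal_create_dataset_sequentially : Prop := ∀ (signal : List Int) (sr : Int) (events : List Int) (from_time : Option Int) (till_time : Option Int) (window_length : Int), Dom_create_dataset_sequentially signal sr events from_time till_time window_length → Pre_create_dataset_sequentially signal sr events from_time till_time window_length → Spec_create_dataset_sequentially signal sr events from_time till_time window_length (create_dataset_sequentially signal sr events from_time till_time window_length)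

-- ===== LEMMAS AND PROOFS =====

-- B's bucketing loop keeps the label list's length fixed.
theorem pv_len_fold_bump (f wl n : Int) (events : List Int) : ∀ (ls : List Int),
    (events.foldl
      (fun ls event =>
        let idx := PySem.Int.floordiv (event - f) wl
        if 0 ≤ idx ∧ idx < n then PySem.List.pySetD ls idx (PySem.List.pyGetD ls idx 0 + 1) else ls)
      ls).length = ls.length := by
  induction events with
  | nil => intro ls; rfl
  | cons e es ih =>
    intro ls
    simp only [List.foldl_cons]
    rw [ih]
    split <;> simp [PySem.List.length_pySetD]

-- Each entry of B's bucketing fold is the initial entry plus the number of events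
-- whose floor-division bucket is that index.
theorem pv_fold_bump_getElem (f wl n : Int) : ∀ (events ls : List Int) (j : Nat),
    j < ls.length → ls.length = n.toNat →
    (events.foldl
      (fun ls event =>
        let idx := PySem.Int.floordiv (event - f) wl
        if 0 ≤ idx ∧ idx < n then PySem.List.pySetD ls idx (PySem.List.pyGetD ls idx 0 + 1) else ls)
      ls)[j]?
    = some (ls[j]?.getD 0 + (events.countP (fun e => decide (PySem.Int.floordiv (e - f) wl = (j : Int))) : Int)) := by
  intro events
  induction events with
  | nil =>
    intro ls j hj hn
    simp [List.getElem?_eq_getElem hj]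
  | cons e es ih =>
    intro ls j hj hn
    simp only [List.foldl_cons, List.countP_cons]
    by_cases hc : 0 ≤ PySem.Int.floordiv (e - f) wl ∧ PySem.Int.floordiv (e - f) wl < n
    · rw [if_pos hc, PySem.List.pySetD_of_nonneg _ _ hc.1]
      have hlt : (PySem.Int.floordiv (e - f) wl).toNat < ls.length := by omega
      rw [ih _ j (by simpa using hj) (by simpa using hn)]
      rw [List.getElem?_set]
      by_cases hij : (PySem.Int.floordiv (e - f) wl).toNat = j
      · have hd : PySem.Int.floordiv (e - f) wl = (j : Int) := by omega
        rw [if_pos hij, if_pos (by omega : (PySem.Int.floordiv (e - f) wl).toNat < ls.length)]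
        simp only [hd, decide_true, if_pos, Option.getD_some]
        rw [PySem.List.pyGetD_eq_getElem ls 0 (by omega : (0 : Int) ≤ (j : Int)) (by omega : ((j : Int)) < (ls.length : Int))]
        simp only [Int.toNat_natCast]
        rw [List.getElem?_eq_getElem hj, Option.getD_some]
        exact congrArg some (by push_cast; omega)
      · have hd : ¬ (PySem.Int.floordiv (e - f) wl = (j : Int)) := by omega
        rw [if_neg hij]
        simp [hd]
    · rw [if_neg hc]
      rw [ih _ j hj hn]
      have : ¬ (PySem.Int.floordiv (e - f) wl = (j : Int)) := by
        intro h; apply hc; constructor <;> omega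
      simp [this]

-- The core equality: A's window-by-window fold equals B's (samples map, bucketed labels).
theorem pv_core (signal : List Int) (sr f wl : Int) (events : List Int) (n : Int) (hwl : wl ≠ 0) :
    (PySem.List.pyRange 0 n 1).foldl
      (fun acc i =>
        let sample_from := f + i * wl
        let sample_till := sample_from + wl
        let events_timestamps := events.foldl
          (fun ts event => if sample_from ≤ event ∧ event < sample_till then ts ++ [event] else ts) []
        let sample := PySem.List.slice signal (some (sample_from * sr)) (some (sample_till * sr))
        (acc.1 ++ [sample], acc.2 ++ [(events_timestamps.length : Int)]))
      ([], [])
    = ((PySem.List.pyRange 0 n 1).map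
        (fun i => PySem.List.slice signal (some ((f + i * wl) * sr)) (some ((f + (i + 1) * wl) * sr))),
       if wl > 0 then
         events.foldl
           (fun ls event =>
             let idx := PySem.Int.floordiv (event - f) wl
             if 0 ≤ idx ∧ idx < n then PySem.List.pySetD ls idx (PySem.List.pyGetD ls idx 0 + 1) else ls)
           (List.replicate n.toNat 0)
       else List.replicate n.toNat 0) := by
  rw [PySem.List.foldl_prod_mk
        (fun s (i : Int) => s ++ [PySem.List.slice signal (some ((f + i * wl) * sr)) (some ((f + i * wl + wl) * sr))])
        (fun s (i : Int) => s ++ [((events.foldl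
          (fun ts event => if f + i * wl ≤ event ∧ event < f + i * wl + wl then ts ++ [event] else ts) []).length : Int)])]
  rw [PySem.List.foldl_append_singleton_eq_map, PySem.List.foldl_append_singleton_eq_map]
  refine Prod.ext ?_ ?_
  · simp only [List.nil_append]
    exact List.map_congr_left (fun a _ => by ring_nf)
  · simp only [List.nil_append]
    have hlen : ∀ (i : Int),
        (events.foldl (fun ts event => if f + i * wl ≤ event ∧ event < f + i * wl + wl then ts ++ [event] else ts) [])
        = events.filter (fun event => decide (f + i * wl ≤ event ∧ event < f + i * wl + wl)) := by
      intro i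
      simpa using PySem.List.foldl_append_if
        (fun event => decide (f + i * wl ≤ event ∧ event < f + i * wl + wl)) (fun x => x) events []
    by_cases hpos : wl > 0
    · rw [if_pos hpos]
      apply List.ext_getElem
      · rw [pv_len_fold_bump]
        simp [PySem.List.length_pyRange_one, List.length_replicate]
      · intro j h1 h2
        have hjn : j < n.toNat := by
          simpa [PySem.List.length_pyRange_one] using h1
        have hget := pv_fold_bump_getElem f wl n events (List.replicate n.toNat 0) j
          (by simpa using hjn) (by simp)
        rw [List.getElem?_eq_getElem (by rwa [pv_len_fold_bump, List.length_replicate])] at hget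
        have hrepl : (List.replicate n.toNat (0 : Int))[j]?.getD 0 = 0 := by
          rw [List.getElem?_eq_getElem (by simpa using hjn : j < (List.replicate n.toNat (0 : Int)).length)]
          simp
        rw [hrepl] at hget
        have hEq := Option.some.inj hget
        rw [hEq]
        rw [List.getElem_map, PySem.List.getElem_pyRange_one, hlen]
        have hpred : (fun event => decide (f + (0 + (j : Int)) * wl ≤ event ∧ event < f + (0 + (j : Int)) * wl + wl))
            = (fun e => decide (PySem.Int.floordiv (e - f) wl = (j : Int))) := by
          funext e
          apply decide_eq_decide.mpr
          rw [PySem.Int.floordiv_eq_iff_of_pos hpos]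
          have hr : ((j : Int) + 1) * wl = (j : Int) * wl + wl := by ring
          have hz : (0 + (j : Int)) = (j : Int) := by ring
          rw [hr, hz]
          constructor <;> (intro h; constructor <;> [linarith [h.1]; linarith [h.2]])
        rw [hpred, List.countP_eq_length_filter]
        omega
    · rw [if_neg hpos]
      have hneg : wl < 0 := by omega
      have hfalse : ∀ (i e : Int),
          (decide (f + i * wl ≤ e ∧ e < f + i * wl + wl)) = false := by
        intro i e
        apply decide_eq_false
        rintro ⟨h1, h2⟩
        linarith
      calc (PySem.List.pyRange 0 n 1).map (fun i => ((events.foldl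
              (fun ts event => if f + i * wl ≤ event ∧ event < f + i * wl + wl then ts ++ [event] else ts) []).length : Int))
          = (PySem.List.pyRange 0 n 1).map (fun _ => (0 : Int)) := by
            apply List.map_congr_left
            intro i _
            rw [hlen i]
            rw [List.filter_eq_nil_iff.mpr (fun e _ => by rw [hfalse i e]; simp)]
            rfl
        _ = List.replicate n.toNat 0 := by
            rw [List.map_const', PySem.List.length_pyRange_one]
            norm_num

-- ===== VERDICT (by name: the statement is the Claim_ definition above) =====
theorem create_dataset_sequentially_spec : Claim_equal_create_dataset_sequentially := by
  intro signal sr events from_time till_time window_length _ hpre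
  unfold Spec_create_dataset_sequentially
  unfold create_dataset_sequentially create_dataset_sequentially_alt
  exact pv_core signal sr (from_time.getD 0) window_length events _ hpre.2
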